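-- pv_equiv track=rewrite | github.com/gaiacianfrini/Rosalind-Assignment-3 | Rosalind 3/rosalind_eubt.py | generate_unrootedtrees
-- ===== SOURCE A (Python) =====
-- def generate_unrootedtrees(list, new_taxa):
--     new_tree = []
--     for i in range(1,len(list)-2):
--         j = -1
--         if not list[i] in '(),;':
--             j = i
--         if list[i]=='(':
--             m=1
--             for j in range(i+1, len(list)):
--                 if list[j]=='(':
--                     m +=1
--                 elif list[j]==')':
--                     m -=1
--                 if m == 0:
--                     break
--         if j!=-1:
--             t =  list[:i] + ['('] + list[i:j+1] + [','] + [new_taxa] + [')'] + list[j+1:]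
--             new_tree.append(t)
--     return new_tree
-- ===== SOURCE B (Python) =====
-- def generate_unrootedtrees(list, new_taxa):
--     n = len(list)
--     match = {}
--     stack = []
--     for k, tok in enumerate(list):
--         if tok == '(':
--             stack.append(k)
--         elif tok == ')':
--             if stack:
--                 match[stack.pop()] = k
--     new_tree = []
--     for i in range(1, n - 2):
--         tok = list[i]
--         if tok == '(':
--             j = match.get(i, n - 1)
--         elif tok not in '(),;':
--             j = i
--         else:
--             continue
--         new_tree.append(list[:i] + ['('] + list[i:j+1] + [','] + [new_taxa] + [')'] + list[j+1:])
--     return new_tree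
-- ===== Notes on version B (the rewrite author's own statement) =====
-- stated objective: faster
-- what changed: B replaces A's per-position forward re-scan for the matching ')' by a single stack pass that builds a match table (open index -> close index) once; each position then gets its j by an O(1) dict lookup (unmatched '(' defaults to len-1, as in A).
import Mathlib
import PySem

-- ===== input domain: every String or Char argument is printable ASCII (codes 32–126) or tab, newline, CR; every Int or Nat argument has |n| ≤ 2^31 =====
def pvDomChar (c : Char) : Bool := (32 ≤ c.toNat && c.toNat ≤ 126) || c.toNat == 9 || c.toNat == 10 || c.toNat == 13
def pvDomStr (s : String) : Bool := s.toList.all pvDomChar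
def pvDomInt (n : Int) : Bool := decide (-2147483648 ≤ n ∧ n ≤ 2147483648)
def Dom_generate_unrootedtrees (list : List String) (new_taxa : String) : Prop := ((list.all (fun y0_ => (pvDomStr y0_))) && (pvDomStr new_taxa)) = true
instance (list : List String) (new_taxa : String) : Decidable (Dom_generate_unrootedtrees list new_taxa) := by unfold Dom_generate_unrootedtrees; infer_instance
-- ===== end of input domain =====

-- B builds the '(' -> ')' match table in one stack pass and replaces A's per-position
-- forward re-scan by a dict lookup (unmatched '(' defaults to len-1, as in A).

-- ===== PORT A =====
-- A's inner loop 'for j in range(i+1, len(list)): …' with break, as recursion over the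
-- range list; every index drawn from the range is in range, so pyGetD is exact here.
def pvAInner (toks : List String) : List Int → Int → Int → Int
  | [], _, j => j
  | k :: ks, m, _ =>
      let t := PySem.List.pyGetD toks k ""
      let m' := if t = "(" then m + 1 else if t = ")" then m - 1 else m
      if m' = 0 then k else pvAInner toks ks m' k

def generate_unrootedtrees (list : List String) (new_taxa : String) : List (List String) :=
  (PySem.List.pyRange 1 ((list.length : Int) - 2) 1).foldl
    (fun new_tree i =>
      let j0 : Int := -1
      let j1 : Int := if PySem.Str.isIn (PySem.List.pyGetD list i "") "(),;" = false then i else j0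
      let j : Int :=
        if PySem.List.pyGetD list i "" = "(" then
          pvAInner list (PySem.List.pyRange (i + 1) (list.length : Int) 1) 1 j1
        else j1
      if j ≠ -1 then
        new_tree ++ [PySem.List.slice list none (some i) ++ ["("] ++
          PySem.List.slice list (some i) (some (j + 1)) ++ [","] ++ [new_taxa] ++ [")"] ++
          PySem.List.slice list (some (j + 1)) none]
      else new_tree) []

-- ===== PORT B =====
-- one pass over 'enumerate(list)' maintaining (stack, match); stack top is the list head
def pvBPass : List String → Int → List Int × PySem.Dict Int Int → List Int × PySem.Dict Int Int
  | [], _, s => s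
  | t :: ts, k, (st, d) =>
      if t = "(" then pvBPass ts (k + 1) (k :: st, d)
      else if t = ")" then
        match st with
        | [] => pvBPass ts (k + 1) ([], d)
        | o :: st' => pvBPass ts (k + 1) (st', d.insert o k)
      else pvBPass ts (k + 1) (st, d)

def generate_unrootedtrees_alt (list : List String) (new_taxa : String) : List (List String) :=
  let n : Int := (list.length : Int)
  let mtch := (pvBPass list 0 ([], PySem.Dict.empty)).2
  (PySem.List.pyRange 1 (n - 2) 1).foldl
    (fun new_tree i =>
      let tok := PySem.List.pyGetD list i ""
      if tok = "(" then
        let j := mtch.getD i (n - 1)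
        new_tree ++ [PySem.List.slice list none (some i) ++ ["("] ++
          PySem.List.slice list (some i) (some (j + 1)) ++ [","] ++ [new_taxa] ++ [")"] ++
          PySem.List.slice list (some (j + 1)) none]
      else if PySem.Str.isIn tok "(),;" = false then
        new_tree ++ [PySem.List.slice list none (some i) ++ ["("] ++
          PySem.List.slice list (some i) (some (i + 1)) ++ [","] ++ [new_taxa] ++ [")"] ++
          PySem.List.slice list (some (i + 1)) none]
      else new_tree) []

-- ===== PRECONDITION & SPEC =====
def Spec_generate_unrootedtrees (list : List String) (new_taxa : String) (out : List (List String)) : Prop := out = generate_unrootedtrees_alt list new_taxa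
instance (list : List String) (new_taxa : String) (out : List (List String)) : Decidable (Spec_generate_unrootedtrees list new_taxa out) := by unfold Spec_generate_unrootedtrees; infer_instance

-- ===== CLAIM (what is proved, stated in full; the proofs are below) =====
def Claim_equal_generate_unrootedtrees : Prop := ∀ (list : List String) (new_taxa : String), Dom_generate_unrootedtrees list new_taxa → Spec_generate_unrootedtrees list new_taxa (generate_unrootedtrees list new_taxa)

-- ===== LEMMAS AND PROOFS =====

-- structural twin of A's inner loop: recursion on the remaining tokens, carrying the index
def pvAInner' : List String → Int → Int → Int → Int
  | [], _, _, j => j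
  | t :: ts, k, m, _ =>
      let m' := if t = "(" then m + 1 else if t = ")" then m - 1 else m
      if m' = 0 then k else pvAInner' ts (k + 1) m' k

lemma pvAInner_eq : ∀ (ts pre : List String) (m j : Int),
    pvAInner (pre ++ ts) (PySem.List.pyRange (pre.length : Int) (((pre ++ ts).length : Int)) 1) m j
      = pvAInner' ts (pre.length : Int) m j := by
  intro ts
  induction ts with
  | nil =>
    intro pre m j
    rw [PySem.List.pyRange_one_eq_nil (by simp)]
    simp [pvAInner, pvAInner']
  | cons t ts ih =>
    intro pre m j
    have hlt : (pre.length : Int) < ((pre ++ t :: ts).length : Int) := by simp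
    rw [PySem.List.pyRange_one_cons hlt]
    have hget : PySem.List.pyGetD (pre ++ t :: ts) (pre.length : Int) "" = t := by
      rw [PySem.List.pyGetD_natCast]
      simp [List.getD]
    simp only [pvAInner, pvAInner', hget]
    rcases eq_or_ne (if t = "(" then m + 1 else if t = ")" then m - 1 else m) 0 with h0 | h0
    · rw [if_pos h0, if_pos h0]
    · rw [if_neg h0, if_neg h0]
      have h := ih (pre ++ [t]) (if t = "(" then m + 1 else if t = ")" then m - 1 else m) (pre.length : Int)
      simp only [List.append_assoc, List.singleton_append, List.length_append, List.length_cons,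
        List.length_nil, Nat.cast_add, Nat.cast_one] at h ⊢
      convert h using 3

lemma pvAInner'_ge : ∀ (ts : List String) (k m j : Int), ts ≠ [] → k ≤ pvAInner' ts k m j := by
  intro ts
  induction ts with
  | nil => intro k m j h; exact absurd rfl h
  | cons t ts ih =>
    intro k m j _
    simp only [pvAInner']
    rcases eq_or_ne (if t = "(" then m + 1 else if t = ")" then m - 1 else m) 0 with h0 | h0
    · rw [if_pos h0]
    · rw [if_neg h0]
      cases ts with
      | nil => simp [pvAInner']
      | cons u us =>
        have := ih (k + 1) (if t = "(" then m + 1 else if t = ")" then m - 1 else m) k (by simp)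
        omega

lemma pvBPass_get?_frozen : ∀ (ts : List String) (k : Int) (st : List Int) (d : PySem.Dict Int Int) (i : Int),
    (∀ x ∈ st, x ≠ i) → i < k →
    (pvBPass ts k (st, d)).2.get? i = d.get? i := by
  intro ts
  induction ts with
  | nil => intro k st d i _ _; rfl
  | cons t ts ih =>
    intro k st d i hst hik
    simp only [pvBPass]
    by_cases h1 : t = "("
    · rw [if_pos h1]
      exact ih (k + 1) (k :: st) d i
        (by
          intro x hx
          rcases List.mem_cons.mp hx with h | h
          · omega
          · exact hst x h)
        (by omega)
    · rw [if_neg h1]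
      by_cases h2 : t = ")"
      · rw [if_pos h2]
        cases st with
        | nil => exact ih (k + 1) [] d i (by simp) (by omega)
        | cons o st' =>
          rw [ih (k + 1) st' (d.insert o k) i (fun x hx => hst x (List.mem_cons_of_mem _ hx)) (by omega)]
          exact PySem.Dict.get?_insert_of_ne _ _ (Ne.symm (hst o List.mem_cons_self))
      · rw [if_neg h2]
        exact ih (k + 1) st d i hst (by omega)

lemma pvBPass_append : ∀ (ts₁ ts₂ : List String) (k : Int) (s : List Int × PySem.Dict Int Int),
    pvBPass (ts₁ ++ ts₂) k s = pvBPass ts₂ (k + (ts₁.length : Int)) (pvBPass ts₁ k s) := by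
  intro ts₁
  induction ts₁ with
  | nil => intro ts₂ k s; simp [pvBPass]
  | cons t ts ih =>
    intro ts₂ k s
    obtain ⟨st, d⟩ := s
    have harith : k + ((t :: ts).length : Int) = (k + 1) + (ts.length : Int) := by push_cast [List.length_cons]; ring
    rw [harith]
    simp only [List.cons_append, pvBPass]
    by_cases h1 : t = "("
    · rw [if_pos h1, if_pos h1, ih]
    · rw [if_neg h1, if_neg h1]
      by_cases h2 : t = ")"
      · rw [if_pos h2, if_pos h2]
        cases st with
        | nil => rw [ih]
        | cons o st' =>
          show pvBPass (ts ++ ts₂) (k + 1) (st', d.insert o k)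
              = pvBPass ts₂ (k + 1 + (ts.length : Int)) (pvBPass ts (k + 1) (st', d.insert o k))
          rw [ih]
      · rw [if_neg h2, if_neg h2, ih]

lemma pvBPass_bound : ∀ (ts : List String) (k : Int) (st : List Int) (d : PySem.Dict Int Int),
    (∀ x ∈ st, x < k) → (∀ x : Int, k ≤ x → d.get? x = none) →
    (∀ x ∈ (pvBPass ts k (st, d)).1, x < k + (ts.length : Int)) ∧
    (∀ x : Int, k + (ts.length : Int) ≤ x → (pvBPass ts k (st, d)).2.get? x = none) := by
  intro ts
  induction ts with
  | nil =>
    intro k st d hst hd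
    constructor
    · intro x hx; have := hst x hx; simp at *; omega
    · intro x hx; exact hd x (by simpa using hx)
  | cons t ts ih =>
    intro k st d hst hd
    have harith : k + ((t :: ts).length : Int) = (k + 1) + (ts.length : Int) := by push_cast [List.length_cons]; ring
    rw [harith]
    simp only [pvBPass]
    by_cases h1 : t = "("
    · rw [if_pos h1]
      exact ih (k + 1) (k :: st) d
        (by
          intro x hx
          rcases List.mem_cons.mp hx with h | h
          · omega
          · have := hst x h; omega)
        (fun x hx => hd x (by omega))
    · rw [if_neg h1]
      by_cases h2 : t = ")"
      · rw [if_pos h2]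
        cases st with
        | nil => exact ih (k + 1) [] d (by simp) (fun x hx => hd x (by omega))
        | cons o st' =>
          refine ih (k + 1) st' (d.insert o k) (fun x hx => by have := hst x (List.mem_cons_of_mem _ hx); omega) ?_
          intro x hx
          rw [PySem.Dict.get?_insert_of_ne _ _ (by have := hst o List.mem_cons_self; omega : x ≠ o)]
          exact hd x (by omega)
      · rw [if_neg h2]
        exact ih (k + 1) st d (fun x hx => by have := hst x hx; omega) (fun x hx => hd x (by omega))

lemma pvBPass_open (ts : List String) (k : Int) (st : List Int) (d : PySem.Dict Int Int) :
    pvBPass ("(" :: ts) k (st, d) = pvBPass ts (k + 1) (k :: st, d) := rfl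

lemma pvBPass_close_cons (ts : List String) (k : Int) (o : Int) (st' : List Int) (d : PySem.Dict Int Int) :
    pvBPass (")" :: ts) k (o :: st', d) = pvBPass ts (k + 1) (st', d.insert o k) := rfl

lemma pvBPass_other (t : String) (ts : List String) (k : Int) (st : List Int) (d : PySem.Dict Int Int)
    (h1 : t ≠ "(") (h2 : t ≠ ")") :
    pvBPass (t :: ts) k (st, d) = pvBPass ts (k + 1) (st, d) := by
  simp [pvBPass, h1, h2]

lemma pvKey : ∀ (ts : List String) (k : Int) (above below : List Int) (d : PySem.Dict Int Int) (i j : Int),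
    (∀ x ∈ above, x < k) → (∀ x ∈ below, x < k) → i < k →
    i ∉ above → i ∉ below → d.get? i = none →
    pvAInner' ts k ((above.length : Int) + 1) j =
      (match (pvBPass ts k (above ++ i :: below, d)).2.get? i with
       | some v => v
       | none => if ts = [] then j else k + (ts.length : Int) - 1) := by
  intro ts
  induction ts with
  | nil =>
    intro k above below d i j _ _ _ _ _ hd
    simp [pvBPass, pvAInner', hd]
  | cons t ts ih =>
    intro k above below d i j hab hbe hik hia hib hd
    simp only [pvAInner']
    by_cases h1 : t = "("
    · subst h1
      simp only [String.reduceEq, reduceIte]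
      rw [if_neg (by omega : ¬ ((above.length : Int) + 1 + 1 = 0))]
      rw [pvBPass_open, ← List.cons_append]
      have h := ih (k + 1) (k :: above) below d i k
        (by
          intro x hx
          rcases List.mem_cons.mp hx with h | h
          · omega
          · have := hab x h; omega)
        (fun x hx => by have := hbe x hx; omega)
        (by omega)
        (by
          intro hx
          rcases List.mem_cons.mp hx with h | h
          · omega
          · exact hia h)
        hib hd
      rw [show (((k :: above).length : Int) + 1) = (above.length : Int) + 1 + 1 by simp] at h
      rcases hres : (pvBPass ts (k + 1) ((k :: above) ++ i :: below, d)).2.get? i with _ | v <;>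
        rw [hres] at h <;> rw [h] <;>
        cases ts <;> simp <;> push_cast <;> ring
    · by_cases h2 : t = ")"
      · subst h2
        simp only [String.reduceEq, reduceIte]
        cases above with
        | nil =>
          simp only [List.nil_append, List.length_nil, Nat.cast_zero, zero_add, sub_self]
          rw [pvBPass_close_cons]
          rw [pvBPass_get?_frozen ts (k + 1) below (d.insert i k) i
            (fun x hx hxi => hib (hxi ▸ hx)) (by omega)]
          rw [PySem.Dict.get?_insert_self]
          simp
        | cons o ab' =>
          rw [if_neg (by simp; omega : ¬ (((o :: ab').length : Int) + 1 - 1 = 0))]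
          rw [List.cons_append, pvBPass_close_cons]
          have h := ih (k + 1) ab' below (d.insert o k) i k
            (fun x hx => by have := hab x (List.mem_cons_of_mem _ hx); omega)
            (fun x hx => by have := hbe x hx; omega)
            (by omega)
            (fun hx => hia (List.mem_cons_of_mem _ hx))
            hib
            (by
              rw [PySem.Dict.get?_insert_of_ne _ _ (fun hio => hia (by rw [hio]; exact List.mem_cons_self))]
              exact hd)
          rw [show ((ab'.length : Int) + 1) = ((o :: ab').length : Int) + 1 - 1 by simp] at h
          rcases hres : (pvBPass ts (k + 1) (ab' ++ i :: below, d.insert o k)).2.get? i with _ | v <;>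
            rw [hres] at h <;> rw [h] <;>
            cases ts <;> simp <;> push_cast <;> ring
      · simp only [if_neg h1, if_neg h2]
        rw [if_neg (by omega : ¬ ((above.length : Int) + 1 = 0))]
        rw [pvBPass_other t ts k _ d h1 h2]
        have h := ih (k + 1) above below d i k
          (fun x hx => by have := hab x hx; omega)
          (fun x hx => by have := hbe x hx; omega)
          (by omega) hia hib hd
        rcases hres : (pvBPass ts (k + 1) (above ++ i :: below, d)).2.get? i with _ | v <;>
          rw [hres] at h <;> rw [h] <;>
          cases ts <;> simp <;> push_cast <;> ring

lemma pvJ_eq (list : List String) (i : Int) (h1 : 1 ≤ i) (h2 : i < (list.length : Int) - 2)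
    (htok : PySem.List.pyGetD list i "" = "(") :
    pvAInner list (PySem.List.pyRange (i + 1) ((list.length : Int)) 1) 1 (-1)
      = ((pvBPass list 0 ([], PySem.Dict.empty)).2).getD i ((list.length : Int) - 1) ∧
    i + 1 ≤ pvAInner list (PySem.List.pyRange (i + 1) ((list.length : Int)) 1) 1 (-1) := by
  have hi0 : 0 ≤ i := by omega
  have hiti : (i.toNat : Int) = i := Int.toNat_of_nonneg hi0
  have hitlen : i.toNat + 3 ≤ list.length := by omega
  have hlt : i.toNat < list.length := by omega
  have hlt' : i < (list.length : Int) := by omega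
  have hgetit : list[i.toNat] = "(" := by
    rw [PySem.List.pyGetD_eq_getElem list "" hi0 (by exact_mod_cast hlt')] at htok
    exact htok
  have hdecomp : list = list.take i.toNat ++ "(" :: list.drop (i.toNat + 1) := by
    conv_lhs => rw [← List.take_append_drop i.toNat list]
    rw [List.drop_eq_getElem_cons hlt, hgetit]
  have hdropne : list.drop (i.toNat + 1) ≠ [] := by
    have : (list.drop (i.toNat + 1)).length = list.length - (i.toNat + 1) := List.length_drop ..
    intro hc
    rw [hc] at this
    simp at this
    omega
  have hdroplen : ((list.drop (i.toNat + 1)).length : Int) = (list.length : Int) - i - 1 := by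
    rw [List.length_drop]
    omega
  -- A's inner scan as a structural recursion on the suffix after position i
  have hpre : (((list.take i.toNat ++ ["("]).length : Int)) = i + 1 := by
    simp [List.length_take]
    omega
  have eA := pvAInner_eq (list.drop (i.toNat + 1)) (list.take i.toNat ++ ["("]) 1 (-1)
  rw [List.append_assoc, List.singleton_append, ← hdecomp, hpre] at eA
  -- B's stack pass split at position i
  rcases hs0 : pvBPass (list.take i.toNat) 0 ([], PySem.Dict.empty) with ⟨st0, d0⟩
  have hbound := pvBPass_bound (list.take i.toNat) 0 [] PySem.Dict.empty (by simp)
    (fun x _ => PySem.Dict.get?_empty x)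
  rw [hs0] at hbound
  have htklen : ((list.take i.toNat).length : Int) = i := by
    simp [List.length_take]
    omega
  rw [htklen] at hbound
  have hsplit := pvBPass_append (list.take i.toNat) ("(" :: list.drop (i.toNat + 1)) 0 ([], PySem.Dict.empty)
  rw [← hdecomp, hs0, htklen] at hsplit
  have hfull : (pvBPass list 0 ([], PySem.Dict.empty)).2
      = (pvBPass (list.drop (i.toNat + 1)) (i + 1) (i :: st0, d0)).2 := by
    rw [hsplit]
    norm_num
    rw [pvBPass_open]
  have hkey := pvKey (list.drop (i.toNat + 1)) (i + 1) [] st0 d0 i (-1)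
    (by simp)
    (fun x hx => by have := hbound.1 x hx; omega)
    (by omega)
    (by simp)
    (fun hc => by have := hbound.1 i hc; omega)
    (hbound.2 i (by omega))
  simp only [List.length_nil, Nat.cast_zero, zero_add, List.nil_append] at hkey
  rw [eA, hfull, PySem.Dict.getD_eq_get?_getD]
  refine ⟨?_, pvAInner'_ge _ _ _ _ hdropne⟩
  rcases hres : (pvBPass (list.drop (i.toNat + 1)) (i + 1) (i :: st0, d0)).2.get? i with _ | v <;>
    rw [hres] at hkey <;> rw [hkey] <;> simp [hdropne, hdroplen] <;> omega

theorem main_eq (list : List String) (new_taxa : String) :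
    generate_unrootedtrees list new_taxa = generate_unrootedtrees_alt list new_taxa := by
  unfold generate_unrootedtrees generate_unrootedtrees_alt
  apply PySem.List.foldl_congr_mem
  intro acc i hi
  rw [PySem.List.mem_pyRange_one] at hi
  by_cases htok : PySem.List.pyGetD list i "" = "("
  · have hj := pvJ_eq list i hi.1 hi.2 htok
    have hj1 := hj.1
    have hj2 := hj.2
    simp only [htok, String.reduceEq, reduceIte,
      if_neg (by decide : ¬ (PySem.Str.isIn "(" "(),;" = false))]
    rw [hj1] at hj2 ⊢
    rw [if_pos (by omega : ((pvBPass list 0 ([], PySem.Dict.empty)).2).getD i ((list.length : Int) - 1) ≠ -1)]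
  · simp only [if_neg htok]
    by_cases hin : PySem.Str.isIn (PySem.List.pyGetD list i "") "(),;" = false
    · simp only [if_pos hin, if_pos (by omega : i ≠ -1)]
    · simp only [if_neg hin]
      simp

-- ===== VERDICT (by name: the statement is the Claim_ definition above) =====
theorem generate_unrootedtrees_spec : Claim_equal_generate_unrootedtrees := by
  intro list new_taxa _
  show generate_unrootedtrees list new_taxa = generate_unrootedtrees_alt list new_taxa
  exact main_eq list new_taxa
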